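-- pv_equiv track=rewrite | github.com/ShabalalaWATP/VRAgent | backend/services/ai_analysis_service.py | _map_to_owasp
-- ===== SOURCE A (Python) =====
-- from typing import Dict, List, Optional, Tuple, Any, Set
--
-- def _map_to_owasp(findings: List[Dict]) -> Dict[str, List[str]]:
--     """Map findings to OWASP Top 10 categories."""
--     owasp_map = {
--         "A01:2021-Broken Access Control": [],
--         "A02:2021-Cryptographic Failures": [],
--         "A03:2021-Injection": [],
--         "A04:2021-Insecure Design": [],
--         "A05:2021-Security Misconfiguration": [],
--         "A06:2021-Vulnerable Components": [],
--         "A07:2021-Auth Failures": [],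
--         "A08:2021-Integrity Failures": [],
--         "A09:2021-Logging Failures": [],
--         "A10:2021-SSRF": [],
--     }
--
--     for f in findings:
--         title = f.get("title", "").lower()
--         technique = f.get("technique", "").lower()
--         cwe = f.get("cwe_id", "")
--
--         # Map based on keywords and CWE
--         if any(x in title or x in technique for x in ["sql", "ldap", "xpath", "nosql", "command", "injection"]):
--             owasp_map["A03:2021-Injection"].append(f.get("title", "Unknown"))
--         elif any(x in title or x in technique for x in ["xss", "cross-site", "script"]):
--             owasp_map["A03:2021-Injection"].append(f.get("title", "Unknown"))
--         elif any(x in title or x in technique for x in ["auth", "session", "cookie", "password"]):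
--             owasp_map["A07:2021-Auth Failures"].append(f.get("title", "Unknown"))
--         elif any(x in title or x in technique for x in ["access", "privilege", "idor", "bola"]):
--             owasp_map["A01:2021-Broken Access Control"].append(f.get("title", "Unknown"))
--         elif any(x in title or x in technique for x in ["ssl", "tls", "crypto", "certificate", "encryption"]):
--             owasp_map["A02:2021-Cryptographic Failures"].append(f.get("title", "Unknown"))
--         elif any(x in title or x in technique for x in ["config", "header", "cors", "csp", "misconfigur"]):
--             owasp_map["A05:2021-Security Misconfiguration"].append(f.get("title", "Unknown"))
--         elif any(x in title or x in technique for x in ["ssrf", "server-side request"]):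
--             owasp_map["A10:2021-SSRF"].append(f.get("title", "Unknown"))
--         elif any(x in title or x in technique for x in ["outdated", "vulnerable", "component", "library"]):
--             owasp_map["A06:2021-Vulnerable Components"].append(f.get("title", "Unknown"))
--
--     # Remove empty categories
--     return {k: v for k, v in owasp_map.items() if v}
-- ===== SOURCE B (Python) =====
-- # Scoring classifier: every keyword carries the priority of its rule; a finding's
-- # category is the minimum priority among ALL matching keywords (no first-match
-- # break), and buckets are grown on demand, then emitted in canonical order.
--
-- _KW_PRIO = {
--     "sql": 0, "ldap": 0, "xpath": 0, "nosql": 0, "command": 0, "injection": 0,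
--     "xss": 1, "cross-site": 1, "script": 1,
--     "auth": 2, "session": 2, "cookie": 2, "password": 2,
--     "access": 3, "privilege": 3, "idor": 3, "bola": 3,
--     "ssl": 4, "tls": 4, "crypto": 4, "certificate": 4, "encryption": 4,
--     "config": 5, "header": 5, "cors": 5, "csp": 5, "misconfigur": 5,
--     "ssrf": 6, "server-side request": 6,
--     "outdated": 7, "vulnerable": 7, "component": 7, "library": 7,
-- }
--
-- _CATS = [
--     "A03:2021-Injection",
--     "A03:2021-Injection",
--     "A07:2021-Auth Failures",
--     "A01:2021-Broken Access Control",
--     "A02:2021-Cryptographic Failures",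
--     "A05:2021-Security Misconfiguration",
--     "A10:2021-SSRF",
--     "A06:2021-Vulnerable Components",
-- ]
--
-- _ORDER = [
--     "A01:2021-Broken Access Control",
--     "A02:2021-Cryptographic Failures",
--     "A03:2021-Injection",
--     "A04:2021-Insecure Design",
--     "A05:2021-Security Misconfiguration",
--     "A06:2021-Vulnerable Components",
--     "A07:2021-Auth Failures",
--     "A08:2021-Integrity Failures",
--     "A09:2021-Logging Failures",
--     "A10:2021-SSRF",
-- ]
--
--
-- def _map_to_owasp(findings):
--     """Map findings to OWASP Top 10 categories."""
--     labeled = []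
--     for f in findings:
--         title = f.get("title", "").lower()
--         technique = f.get("technique", "").lower()
--         hits = [p for kw, p in _KW_PRIO.items() if kw in title or kw in technique]
--         if hits:
--             labeled.append((_CATS[min(hits)], f.get("title", "Unknown")))
--     buckets = {}
--     for cat, t in labeled:
--         buckets.setdefault(cat, []).append(t)
--     return {k: buckets[k] for k in _ORDER if k in buckets}
-- ===== Notes on version B (the rewrite author's own statement) =====
-- stated objective: alternative
-- what changed: Replaces A's eight-branch elif first-match chain over a pre-initialized ten-key dict by a scoring classifier: every keyword carries its rule's priority, a finding's category is the minimum priority among ALL matching keywords (no short-circuit), and titles are grouped into on-demand buckets that are reordered into canonical A01..A10 order at the end.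
import Mathlib
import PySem

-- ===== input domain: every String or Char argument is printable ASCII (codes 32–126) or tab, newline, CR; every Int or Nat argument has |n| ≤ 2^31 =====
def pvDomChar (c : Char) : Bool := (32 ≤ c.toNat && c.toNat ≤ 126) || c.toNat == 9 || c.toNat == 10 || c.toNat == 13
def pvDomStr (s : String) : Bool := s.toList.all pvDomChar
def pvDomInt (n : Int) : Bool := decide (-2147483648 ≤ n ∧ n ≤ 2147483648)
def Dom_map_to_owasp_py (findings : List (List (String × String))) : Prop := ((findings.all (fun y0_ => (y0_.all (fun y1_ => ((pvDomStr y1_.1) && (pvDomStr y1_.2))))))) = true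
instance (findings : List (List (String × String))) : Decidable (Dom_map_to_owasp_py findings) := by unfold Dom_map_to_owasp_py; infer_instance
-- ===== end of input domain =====

-- B replaces A's elif first-match chain over a pre-initialized ten-key dict by a scoring
-- classifier (minimum rule priority over ALL matching keywords) with on-demand buckets
-- reordered at the end (objective: alternative).

-- shared primitive of both Pythons: f.get(k, dflt)
def fget (f : List (String × String)) (k dflt : String) : String :=
  PySem.Dict.getD ⟨f⟩ k dflt

-- ===== PORT A =====
-- any(x in title or x in technique for x in kws)
def kwAny (kws : List String) (title technique : String) : Bool :=
  kws.any (fun x => PySem.Str.isIn x title || PySem.Str.isIn x technique)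

-- loop body of A's for-loop: the if/elif keyword chain updating the dict in place
def owaspStep (d : PySem.Dict String (List String)) (f : List (String × String)) :
    PySem.Dict String (List String) :=
  let title := PySem.Str.lower (fget f "title" "")
  let technique := PySem.Str.lower (fget f "technique" "")
  let _cwe := fget f "cwe_id" ""
  if kwAny ["sql", "ldap", "xpath", "nosql", "command", "injection"] title technique then
    d.modify "A03:2021-Injection" [] (fun v => v ++ [fget f "title" "Unknown"])
  else if kwAny ["xss", "cross-site", "script"] title technique then
    d.modify "A03:2021-Injection" [] (fun v => v ++ [fget f "title" "Unknown"])
  else if kwAny ["auth", "session", "cookie", "password"] title technique then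
    d.modify "A07:2021-Auth Failures" [] (fun v => v ++ [fget f "title" "Unknown"])
  else if kwAny ["access", "privilege", "idor", "bola"] title technique then
    d.modify "A01:2021-Broken Access Control" [] (fun v => v ++ [fget f "title" "Unknown"])
  else if kwAny ["ssl", "tls", "crypto", "certificate", "encryption"] title technique then
    d.modify "A02:2021-Cryptographic Failures" [] (fun v => v ++ [fget f "title" "Unknown"])
  else if kwAny ["config", "header", "cors", "csp", "misconfigur"] title technique then
    d.modify "A05:2021-Security Misconfiguration" [] (fun v => v ++ [fget f "title" "Unknown"])
  else if kwAny ["ssrf", "server-side request"] title technique then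
    d.modify "A10:2021-SSRF" [] (fun v => v ++ [fget f "title" "Unknown"])
  else if kwAny ["outdated", "vulnerable", "component", "library"] title technique then
    d.modify "A06:2021-Vulnerable Components" [] (fun v => v ++ [fget f "title" "Unknown"])
  else d

def map_to_owasp_py (findings : List (List (String × String))) : List (String × List String) :=
  let owasp_map : PySem.Dict String (List String) := PySem.Dict.ofList
    [("A01:2021-Broken Access Control", []),
     ("A02:2021-Cryptographic Failures", []),
     ("A03:2021-Injection", []),
     ("A04:2021-Insecure Design", []),
     ("A05:2021-Security Misconfiguration", []),
     ("A06:2021-Vulnerable Components", []),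
     ("A07:2021-Auth Failures", []),
     ("A08:2021-Integrity Failures", []),
     ("A09:2021-Logging Failures", []),
     ("A10:2021-SSRF", [])]
  let final := findings.foldl owaspStep owasp_map
  final.items.filter (fun p => !p.2.isEmpty)

-- ===== PORT B =====
-- the _KW_PRIO dict of Source B: keyword -> priority (= index of its rule in A's chain)
def kwPrio : List (String × Nat) :=
  [("sql", 0), ("ldap", 0), ("xpath", 0), ("nosql", 0), ("command", 0), ("injection", 0),
   ("xss", 1), ("cross-site", 1), ("script", 1),
   ("auth", 2), ("session", 2), ("cookie", 2), ("password", 2),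
   ("access", 3), ("privilege", 3), ("idor", 3), ("bola", 3),
   ("ssl", 4), ("tls", 4), ("crypto", 4), ("certificate", 4), ("encryption", 4),
   ("config", 5), ("header", 5), ("cors", 5), ("csp", 5), ("misconfigur", 5),
   ("ssrf", 6), ("server-side request", 6),
   ("outdated", 7), ("vulnerable", 7), ("component", 7), ("library", 7)]

def owaspCats : List String :=
  ["A03:2021-Injection",
   "A03:2021-Injection",
   "A07:2021-Auth Failures",
   "A01:2021-Broken Access Control",
   "A02:2021-Cryptographic Failures",
   "A05:2021-Security Misconfiguration",
   "A10:2021-SSRF",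
   "A06:2021-Vulnerable Components"]

def owaspOrder : List String :=
  ["A01:2021-Broken Access Control",
   "A02:2021-Cryptographic Failures",
   "A03:2021-Injection",
   "A04:2021-Insecure Design",
   "A05:2021-Security Misconfiguration",
   "A06:2021-Vulnerable Components",
   "A07:2021-Auth Failures",
   "A08:2021-Integrity Failures",
   "A09:2021-Logging Failures",
   "A10:2021-SSRF"]

-- body of Source B's labelling loop: priorities of all matching keywords, min, _CATS lookup
-- (the _CATS[min(hits)] index is always 0..7, so the pyGet? option is always some)
def labelOf (f : List (String × String)) : Option (String × String) :=
  let title := PySem.Str.lower (fget f "title" "")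
  let technique := PySem.Str.lower (fget f "technique" "")
  let hits := (kwPrio.filter
    (fun p => PySem.Str.isIn p.1 title || PySem.Str.isIn p.1 technique)).map Prod.snd
  match PySem.List.min? hits (fun x => x) with
  | some m => some ((PySem.List.pyGet? owaspCats (m : Int)).getD "", fget f "title" "Unknown")
  | none => none

def map_to_owasp_py_alt (findings : List (List (String × String))) :
    List (String × List String) :=
  let labeled := findings.filterMap labelOf
  let buckets := labeled.foldl
    (fun d p => d.modify p.1 [] (fun v => v ++ [p.2])) PySem.Dict.empty
  owaspOrder.filterMap (fun k => (buckets.get? k).map (fun v => (k, v)))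

-- ===== PRECONDITION & SPEC =====
def Spec_map_to_owasp_py (findings : List (List (String × String))) (out : List (String × List String)) : Prop := out = map_to_owasp_py_alt findings
instance (findings : List (List (String × String))) (out : List (String × List String)) : Decidable (Spec_map_to_owasp_py findings out) := by unfold Spec_map_to_owasp_py; infer_instance

-- ===== CLAIM (what is proved, stated in full; the proofs are below) =====
def Claim_equal_map_to_owasp_py : Prop := ∀ (findings : List (List (String × String))), Dom_map_to_owasp_py findings → Spec_map_to_owasp_py findings (map_to_owasp_py findings)

-- ===== LEMMAS AND PROOFS =====

-- A's rule table, for the proofs: category and keywords of each elif branch, in order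
def owaspRules : List (String × List String) :=
  [("A03:2021-Injection", ["sql", "ldap", "xpath", "nosql", "command", "injection"]),
   ("A03:2021-Injection", ["xss", "cross-site", "script"]),
   ("A07:2021-Auth Failures", ["auth", "session", "cookie", "password"]),
   ("A01:2021-Broken Access Control", ["access", "privilege", "idor", "bola"]),
   ("A02:2021-Cryptographic Failures", ["ssl", "tls", "crypto", "certificate", "encryption"]),
   ("A05:2021-Security Misconfiguration", ["config", "header", "cors", "csp", "misconfigur"]),
   ("A10:2021-SSRF", ["ssrf", "server-side request"]),
   ("A06:2021-Vulnerable Components", ["outdated", "vulnerable", "component", "library"])]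

-- first matching rule's category (A's elif chain, abstractly)
def firstRule (title technique : String) : List (String × List String) → Option String
  | [] => none
  | r :: rs => if kwAny r.2 title technique then some r.1 else firstRule title technique rs

def classify (f : List (String × String)) : Option String :=
  let title := PySem.Str.lower (fget f "title" "")
  let technique := PySem.Str.lower (fget f "technique" "")
  firstRule title technique owaspRules

-- the keyword lists of the rules, and the flattening that produces kwPrio
def rulesK : List (List String) :=
  [["sql", "ldap", "xpath", "nosql", "command", "injection"],
   ["xss", "cross-site", "script"],
   ["auth", "session", "cookie", "password"],
   ["access", "privilege", "idor", "bola"],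
   ["ssl", "tls", "crypto", "certificate", "encryption"],
   ["config", "header", "cors", "csp", "misconfigur"],
   ["ssrf", "server-side request"],
   ["outdated", "vulnerable", "component", "library"]]

def flat (n : Nat) : List (List String) → List (String × Nat)
  | [] => []
  | g :: gs => g.map (fun kw => (kw, n)) ++ flat (n + 1) gs

def firstIdx (m : String → Bool) : List (List String) → Option Nat
  | [] => none
  | g :: gs => if g.any m then some 0 else (firstIdx m gs).map (· + 1)

theorem kwPrio_eq_flat : kwPrio = flat 0 rulesK := by rfl

theorem mem_flat_le (kw : String) (x n : Nat) (gs : List (List String))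
    (h : (kw, x) ∈ flat n gs) : n ≤ x := by
  induction gs generalizing n with
  | nil => simp [flat] at h
  | cons g gs ih =>
    simp only [flat, List.mem_append, List.mem_map] at h
    rcases h with ⟨a, ha, heq⟩ | h
    · cases heq; omega
    · have := ih (n + 1) h; omega

theorem min_flat (m : String → Bool) (gs : List (List String)) (n : Nat) :
    PySem.List.min? (((flat n gs).filter (fun p => m p.1)).map Prod.snd) (fun x => x) =
      (firstIdx m gs).map (· + n) := by
  induction gs generalizing n with
  | nil => simp [flat, firstIdx, PySem.List.min?]
  | cons g gs ih =>
    have hflat : ((flat n (g :: gs)).filter (fun p => m p.1)).map Prod.snd =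
        (g.filter m).map (fun _ => n) ++
          ((flat (n + 1) gs).filter (fun p => m p.1)).map Prod.snd := by
      simp only [flat, List.filter_append, List.map_append, List.filter_map]
      congr 1
      simp [List.map_map, Function.comp_def]
    rw [hflat]
    by_cases hm : g.any m
    · -- some keyword of g matches: the whole list starts with a copy of n and all elements ≥ n
      have hne : g.filter m ≠ [] := by
        simp only [ne_eq, List.filter_eq_nil_iff]
        simp only [List.any_eq_true] at hm
        push Not
        exact hm
      obtain ⟨a, as, has⟩ := List.exists_cons_of_ne_nil hne
      have hmap : (g.filter m).map (fun _ => n) = n :: as.map (fun _ => n) := by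
        rw [has]; rfl
      rw [hmap]
      have hge : ∀ y ∈ as.map (fun (_ : String) => n) ++
          ((flat (n + 1) gs).filter (fun p => m p.1)).map Prod.snd, n ≤ y := by
        intro y hy
        rcases List.mem_append.mp hy with hy | hy
        · rcases List.mem_map.mp hy with ⟨_, _, rfl⟩; exact le_refl n
        · rcases List.mem_map.mp hy with ⟨⟨kw, x⟩, hx, rfl⟩
          have := mem_flat_le kw x (n + 1) gs (List.mem_filter.mp hx).1
          omega
      rw [List.cons_append, PySem.List.min?_id_cons]
      have hle := PySem.List.foldl_min_le
        (as.map (fun (_ : String) => n) ++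
          ((flat (n + 1) gs).filter (fun p => m p.1)).map Prod.snd) n
      have hmem := PySem.List.foldl_min_mem
        (as.map (fun (_ : String) => n) ++
          ((flat (n + 1) gs).filter (fun p => m p.1)).map Prod.snd) n
      have : (as.map (fun (_ : String) => n) ++
          ((flat (n + 1) gs).filter (fun p => m p.1)).map Prod.snd).foldl min n = n := by
        rcases hmem with h | h
        · exact h
        · exact le_antisymm hle.1 (hge _ h)
      rw [this]
      simp [firstIdx, hm]
    · have hnil : g.filter m = [] := by
        simp only [List.filter_eq_nil_iff]
        intro a ha hma
        exact hm (List.any_eq_true.mpr ⟨a, ha, hma⟩)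
      rw [hnil]
      simp only [List.map_nil, List.nil_append]
      rw [ih (n + 1)]
      simp only [firstIdx, hm]
      cases firstIdx m gs <;> simp <;> omega

-- the chain over the literal rules, through the _CATS lookup
theorem chain_eq (title technique : String) :
    (firstIdx (fun kw => PySem.Str.isIn kw title || PySem.Str.isIn kw technique) rulesK).map
        (fun i => (PySem.List.pyGet? owaspCats (i : Int)).getD "") =
      firstRule title technique owaspRules := by
  simp only [rulesK, owaspRules, firstIdx, firstRule, kwAny]
  split_ifs <;> rfl

theorem label_core (title technique t : String) :
    (match PySem.List.min? ((kwPrio.filter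
        (fun p => PySem.Str.isIn p.1 title || PySem.Str.isIn p.1 technique)).map Prod.snd)
        (fun x => x) with
     | some m => some ((PySem.List.pyGet? owaspCats (m : Int)).getD "", t)
     | none => none) =
      (firstRule title technique owaspRules).map (fun c => (c, t)) := by
  rw [kwPrio_eq_flat]
  rw [min_flat (fun kw => PySem.Str.isIn kw title || PySem.Str.isIn kw technique) rulesK 0,
    ← chain_eq]
  cases firstIdx (fun kw => PySem.Str.isIn kw title || PySem.Str.isIn kw technique) rulesK <;>
    simp

theorem labelOf_eq (f : List (String × String)) :
    labelOf f = (classify f).map (fun c => (c, fget f "title" "Unknown")) := by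
  unfold labelOf classify
  exact label_core _ _ _

-- the titles classified to category k (A's view)
def collect (k : String) (fs : List (List (String × String))) : List String :=
  ((fs.map (fun f => (classify f, fget f "title" "Unknown"))).filter
    (fun p => p.1 == some k)).map (fun p => p.2)

theorem collect_nil (k : String) : collect k [] = [] := rfl

theorem collect_cons (k : String) (f : List (String × String)) (fs : List (List (String × String))) :
    collect k (f :: fs) =
      if classify f = some k then fget f "title" "Unknown" :: collect k fs else collect k fs := by
  simp only [collect, List.map_cons, List.filter_cons]
  by_cases h : classify f = some k <;> simp [h]

-- B's labeled list, filtered per category, is A's collect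
theorem labeled_filter (k : String) (fs : List (List (String × String))) :
    ((fs.filterMap labelOf).filter (fun p => p.1 == k)).map Prod.snd = collect k fs := by
  induction fs with
  | nil => rfl
  | cons f fs ih =>
    rw [List.filterMap_cons, labelOf_eq f, collect_cons]
    cases hc : classify f with
    | none => simpa [hc] using ih
    | some c =>
      simp only [Option.map_some]
      rw [List.filter_cons]
      by_cases hck : c = k
      · subst hck; simp [ih]
      · have hb : ((c, fget f "title" "Unknown").1 == k) = false := by simpa using hck
        simp [hb, hck, ih]

-- A's loop body in terms of the classifier
theorem owaspStep_eq (d : PySem.Dict String (List String)) (f : List (String × String)) :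
    owaspStep d f =
      match classify f with
      | some c => d.modify c [] (fun v => v ++ [fget f "title" "Unknown"])
      | none => d := by
  simp only [owaspStep, classify, owaspRules, firstRule]
  split_ifs <;> rfl

-- the shape invariant of A's dict: items are exactly the ten keys in order, with their getD values
def Shaped (d : PySem.Dict String (List String)) : Prop :=
  d.items = owaspOrder.map (fun k => (k, d.getD k []))

theorem getD_modify' (d : PySem.Dict String (List String)) (c k : String)
    (g : List String → List String) :
    (d.modify c [] g).getD k [] = if k = c then g (d.getD c []) else d.getD k [] :=
  PySem.Dict.getD_modify d c k [] g

theorem shaped_modify (d : PySem.Dict String (List String)) (c : String)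
    (hc : c ∈ owaspOrder) (h : Shaped d) (g : List String → List String) :
    Shaped (d.modify c [] g) := by
  have hcont : d.contains c = true := by
    rw [PySem.Dict.contains, h]
    simp only [List.any_eq_true]
    exact ⟨(c, d.getD c []), List.mem_map.mpr ⟨c, hc, rfl⟩, by simp⟩
  unfold Shaped
  rw [PySem.Dict.modify, PySem.Dict.items_insert_of_contains _ _ hcont, h, List.map_map]
  refine List.map_congr_left (fun k hk => ?_)
  have hg : (d.modify c [] g).getD k [] = if k = c then g (d.getD c []) else d.getD k [] :=
    getD_modify' d c k g
  rw [PySem.Dict.modify] at hg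
  rw [hg]
  by_cases hkc : k = c
  · subst hkc; simp
  · simp [hkc]

-- classify lands in the ten keys
theorem classify_mem (f : List (String × String)) (c : String)
    (h : classify f = some c) : c ∈ owaspOrder := by
  simp only [classify, owaspRules, firstRule] at h
  split_ifs at h <;> simp_all [owaspOrder]

-- the fold invariant of A's loop
theorem fold_shape (fs : List (List (String × String))) :
    ∀ d : PySem.Dict String (List String), Shaped d →
      (fs.foldl owaspStep d).items =
        owaspOrder.map (fun k => (k, d.getD k [] ++ collect k fs)) := by
  induction fs with
  | nil => intro d hd; simpa [collect_nil] using hd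
  | cons f fs ih =>
    intro d hd
    rw [List.foldl_cons, owaspStep_eq]
    cases hc : classify f with
    | none =>
      rw [ih d hd]
      refine List.map_congr_left (fun k hk => ?_)
      rw [collect_cons, hc]
      simp
    | some c =>
      have hcm := classify_mem f c hc
      rw [ih _ (shaped_modify d c hcm hd _)]
      refine List.map_congr_left (fun k hk => ?_)
      rw [collect_cons, hc, getD_modify']
      by_cases hkc : k = c <;> simp [hkc, Ne.symm]

-- B's buckets: lookup in the on-demand dict per category
theorem buckets_get? (fs : List (List (String × String))) (k : String) :
    (((fs.filterMap labelOf).foldl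
        (fun d p => d.modify p.1 [] (fun v => v ++ [p.2])) PySem.Dict.empty).get? k) =
      if collect k fs = [] then none else some (collect k fs) := by
  set d := ((fs.filterMap labelOf).foldl
    (fun d p => d.modify p.1 [] (fun v => v ++ [p.2])) PySem.Dict.empty) with hd
  have hgetD : d.getD k [] = collect k fs := by
    rw [hd, PySem.Dict.getD_foldl_modify_append, ← labeled_filter]
    simp [PySem.Dict.getD_empty]
  have hkeys : d.contains k = true ↔ collect k fs ≠ [] := by
    rw [hd, PySem.Dict.contains_iff_mem_keys, PySem.Dict.keys_foldl_modify_key]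
    rw [show (PySem.Dict.empty : PySem.Dict String (List String)).keys = [] from rfl]
    rw [PySem.Set.update_nil_left, PySem.Set.mem_ofList]
    rw [← labeled_filter k fs]
    constructor
    · rintro hmem
      rcases List.mem_map.mp hmem with ⟨⟨c, t⟩, hct, rfl⟩
      intro hnil
      have hmem2 : (c, t) ∈ (fs.filterMap labelOf).filter (fun p => p.1 == c) :=
        List.mem_filter.mpr ⟨hct, by simp⟩
      rw [show ((fs.filterMap labelOf).filter (fun p => p.1 == c)) =
        [] from List.map_eq_nil_iff.mp hnil] at hmem2
      simp at hmem2
    · intro hne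
      rcases List.exists_mem_of_ne_nil _ hne with ⟨t, ht⟩
      rcases List.mem_map.mp ht with ⟨⟨c, t'⟩, hct, rfl⟩
      have hck : c = k := by
        have := (List.mem_filter.mp hct).2
        simpa using this
      subst hck
      exact List.mem_map.mpr ⟨(c, t'), (List.mem_filter.mp hct).1, rfl⟩
  by_cases hnil : collect k fs = []
  · rw [if_pos hnil, PySem.Dict.get?_eq_none_iff_contains]
    rcases Bool.eq_false_or_eq_true (d.contains k) with h | h
    · exact absurd (hkeys.mp h) (by simp [hnil])
    · exact h
  · rw [if_neg hnil]
    have hsome : (d.get? k).isSome := by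
      rw [← PySem.Dict.contains_eq_isSome_get?]
      exact hkeys.mpr hnil
    rcases Option.isSome_iff_exists.mp hsome with ⟨v, hv⟩
    have hval := PySem.Dict.getD_eq_get?_getD (d := d) (k := k) (d0 := ([] : List String))
    rw [hv, Option.getD_some] at hval
    rw [hv, ← hgetD, hval]

-- turning A's final filter into B's ordered filterMap
theorem filter_map_eq_filterMap (l : List String) (g : String → List String) :
    (l.map (fun k => (k, g k))).filter (fun p => !p.2.isEmpty) =
      l.filterMap (fun k => if (g k).isEmpty then none else some (k, g k)) := by
  induction l with
  | nil => rfl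
  | cons a l ih =>
    simp only [List.map_cons, List.filter_cons, List.filterMap_cons]
    cases h : (g a).isEmpty <;> simp [ih]

-- the initial dict is Shaped with all-empty values
def initDict : PySem.Dict String (List String) := PySem.Dict.ofList
  [("A01:2021-Broken Access Control", []),
   ("A02:2021-Cryptographic Failures", []),
   ("A03:2021-Injection", []),
   ("A04:2021-Insecure Design", []),
   ("A05:2021-Security Misconfiguration", []),
   ("A06:2021-Vulnerable Components", []),
   ("A07:2021-Auth Failures", []),
   ("A08:2021-Integrity Failures", []),
   ("A09:2021-Logging Failures", []),
   ("A10:2021-SSRF", [])]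

theorem init_shaped : initDict.items = owaspOrder.map (fun k => (k, [])) := by decide

theorem init_getD (k : String) (hk : k ∈ owaspOrder) : initDict.getD k [] = [] := by
  fin_cases hk <;> decide

-- ===== VERDICT (by name: the statement is the Claim_ definition above) =====
theorem map_to_owasp_py_spec : Claim_equal_map_to_owasp_py := by
  intro findings _
  show ((findings.foldl owaspStep initDict).items).filter (fun p => !p.2.isEmpty) =
    map_to_owasp_py_alt findings
  have hsh : Shaped initDict := by
    unfold Shaped
    rw [init_shaped]
    exact List.map_congr_left (fun k hk => by rw [init_getD k hk])
  rw [fold_shape findings _ hsh]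
  have hmap : (owaspOrder.map (fun k => (k, initDict.getD k [] ++ collect k findings))) =
      owaspOrder.map (fun k => (k, collect k findings)) :=
    List.map_congr_left (fun k hk => by rw [init_getD k hk]; rfl)
  rw [hmap, filter_map_eq_filterMap]
  show _ = owaspOrder.filterMap (fun k =>
    (((findings.filterMap labelOf).foldl
        (fun d p => d.modify p.1 [] (fun v => v ++ [p.2])) PySem.Dict.empty).get? k).map
      (fun v => (k, v)))
  refine (List.filterMap_congr ?_).symm
  intro k hk
  rw [buckets_get? findings k]
  by_cases h : collect k findings = [] <;> simp [h, List.isEmpty_iff]
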